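-- pv_equiv track=rewrite | github.com/mpsilfve/glossing-UI | backend_fairseq/pretrained_models/run_fairseq.py | preprocess_line
-- ===== SOURCE A (Python) =====
-- def preprocess_line(sentence, n_context):
--     pad_s = ['<S>' for i in range(n_context)]
--     pad_e = ['<E>' for i in range(n_context)]
--     padded_tokens = pad_s + sentence.split(' ') + pad_e
--
--     context_tokens = []
--     for i in range(n_context, len(padded_tokens) - n_context):
--         # get target token and two neighbors on either side
--         context = padded_tokens[i-n_context:i+n_context+1]
--         preprocessed = []
--         for t in context:
--             if t == '<S>' or t == '<E>':
--                 preprocessed.append(t)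
--             else:
--                 preprocessed.append(' '.join(list(t)))
--         # add examples to collectors
--         context_tokens.append(' _ '.join(preprocessed))
--
--     return context_tokens
-- ===== SOURCE B (Python) =====
-- def preprocess_line(sentence, n_context):
--     # Online sliding-window: one streaming pass over the tokens, maintaining
--     # the current window; no index arithmetic, no per-window slicing.
--     width = 2 * n_context + 1
--     out = []
--     window = ['<S>'] * n_context
--     for t in sentence.split(' ') + ['<E>'] * n_context:
--         window.append(t if t == '<S>' or t == '<E>' else ' '.join(t))
--         if len(window) == width:
--             out.append(' _ '.join(window))
--             del window[0]
--     return out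
-- ===== Notes on version B (the rewrite author's own statement) =====
-- stated objective: alternative
-- what changed: B replaces A's index-range loop with per-window slicing and an inner re-transform loop by a single streaming pass that maintains a sliding window, transforming each token once as it enters, emitting a joined line whenever the window fills and dropping its oldest element.
-- outside the precondition, e.g. on preprocess_line('a b', -1): A returns ['a', '', '', ''], B returns []
import Mathlib
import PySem

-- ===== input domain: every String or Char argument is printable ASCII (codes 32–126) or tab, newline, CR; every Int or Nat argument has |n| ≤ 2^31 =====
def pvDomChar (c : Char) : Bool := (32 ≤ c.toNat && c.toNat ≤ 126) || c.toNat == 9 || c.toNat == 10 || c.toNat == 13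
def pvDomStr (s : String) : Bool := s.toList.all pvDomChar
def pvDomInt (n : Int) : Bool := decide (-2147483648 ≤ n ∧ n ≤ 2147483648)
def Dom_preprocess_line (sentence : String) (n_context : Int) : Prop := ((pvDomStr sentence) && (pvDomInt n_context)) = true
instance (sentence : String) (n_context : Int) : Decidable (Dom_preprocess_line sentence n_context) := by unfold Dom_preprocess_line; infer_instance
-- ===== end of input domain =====

-- B is a single streaming pass with a sliding-window accumulator instead of A's
-- index-range loop with per-window slicing and an inner re-transform loop;
-- return value proved equal to A's for every n_context ≥ 0.

-- ===== PORT A =====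
def preprocess_line (sentence : String) (n_context : Int) : List String :=
  let pad_s := (PySem.List.pyRange 0 n_context 1).map (fun _ => "<S>")
  let pad_e := (PySem.List.pyRange 0 n_context 1).map (fun _ => "<E>")
  -- sentence.split(' '): sep is the non-empty literal " ", so split? is always some
  let padded_tokens := pad_s ++ (PySem.Str.split? sentence " ").getD [] ++ pad_e
  (PySem.List.pyRange n_context ((padded_tokens.length : Int) - n_context) 1).foldl
    (fun context_tokens i =>
      let context := PySem.List.slice padded_tokens (some (i - n_context)) (some (i + n_context + 1))
      let preprocessed := context.foldl
        (fun acc t =>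
          if t = "<S>" ∨ t = "<E>" then acc ++ [t]
          else acc ++ [PySem.Str.join " " (t.toList.map (fun c => String.ofList [c]))]) []
      context_tokens ++ [PySem.Str.join " _ " preprocessed]) []

-- ===== PORT B =====
-- Source B's inline conditional expression, as a helper
def plSpread (t : String) : String :=
  if t = "<S>" ∨ t = "<E>" then t
  else PySem.Str.join " " (t.toList.map (fun c => String.ofList [c]))

def preprocess_line_alt (sentence : String) (n_context : Int) : List String :=
  let width : Int := 2 * n_context + 1
  -- ['<S>'] * n_context: Python list repetition (empty for n_context ≤ 0)
  (((PySem.Str.split? sentence " ").getD [] ++ List.replicate n_context.toNat "<E>").foldl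
    (fun (st : List String × List String) t =>
      let w := st.1 ++ [plSpread t]
      if (w.length : Int) = width then (w.drop 1, st.2 ++ [PySem.Str.join " _ " w])
      else (w, st.2))
    (List.replicate n_context.toNat "<S>", [])).2

-- ===== PRECONDITION & SPEC =====
-- Pre_ excludes negative n_context — outside the task's natural domain — where
-- A's nonempty output is an accident of Python negative-index slicing and B
-- naturally returns [].
def Pre_preprocess_line (sentence : String) (n_context : Int) : Prop := 0 ≤ n_context
instance (sentence : String) (n_context : Int) : Decidable (Pre_preprocess_line sentence n_context) := by unfold Pre_preprocess_line; infer_instance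
def pvWitness_preprocess_line : String × Int := ("a cat", 1)

def Spec_preprocess_line (sentence : String) (n_context : Int) (out : List String) : Prop := out = preprocess_line_alt sentence n_context
instance (sentence : String) (n_context : Int) (out : List String) : Decidable (Spec_preprocess_line sentence n_context out) := by unfold Spec_preprocess_line; infer_instance

-- ===== CLAIM (what is proved, stated in full; the proofs are below) =====
def Claim_equal_preprocess_line : Prop := ∀ (sentence : String) (n_context : Int), Dom_preprocess_line sentence n_context → Pre_preprocess_line sentence n_context → Spec_preprocess_line sentence n_context (preprocess_line sentence n_context)

-- ===== LEMMAS AND PROOFS =====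

-- all ' _ '-joined contiguous windows of length `width`, by structural recursion
def wjoins (width : Nat) : List String → List String
  | [] => []
  | x :: xs =>
      if width ≤ xs.length + 1 then
        PySem.Str.join " _ " ((x :: xs).take width) :: wjoins width xs
      else []

-- a foldl that only appends singletons is a map
theorem pl_foldl_push {α β : Type} (f : α → β) :
    ∀ (l : List α) (init : List β),
      l.foldl (fun acc x => acc ++ [f x]) init = init ++ l.map f := by
  intro l
  induction l with
  | nil => simp
  | cons x xs ih => intro init; simp [List.foldl_cons, ih]

-- windows shorter than width: none
theorem wjoins_of_short (width : Nat) :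
    ∀ (xs : List String), xs.length < width → wjoins width xs = [] := by
  intro xs
  induction xs with
  | nil => intro _; rfl
  | cons x xs ih =>
      intro h
      simp only [wjoins]
      rw [if_neg (by simp at h ⊢; omega)]

-- wjoins as a map over starting positions
theorem wjoins_eq_range_map (width : Nat) (hw : 1 ≤ width) :
    ∀ (xs : List String),
      wjoins width xs
        = (List.range (xs.length + 1 - width)).map
            (fun j => PySem.Str.join " _ " ((xs.drop j).take width)) := by
  intro xs
  induction xs with
  | nil =>
      have : 0 + 1 - width = 0 := by omega
      simp [wjoins, this]
  | cons x xs ih =>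
      by_cases h : width ≤ xs.length + 1
      · have hlen : xs.length + 1 + 1 - width = (xs.length + 1 - width) + 1 := by omega
        simp only [wjoins, if_pos h, List.length_cons, hlen,
          List.range_succ_eq_map, List.map_cons, List.map_map]
        refine congrArg₂ List.cons (by simp) ?_
        rw [ih]
        apply List.map_congr_left
        intro j _
        simp [Function.comp]
      · have hlen : xs.length + 1 + 1 - width = 0 := by omega
        simp [wjoins, if_neg h, hlen]

-- the sliding-window fold emits exactly the windows of (pending ++ rest)
theorem pl_slide_inv (width : Nat) :
    ∀ (l w acc : List String), w.length + 1 ≤ width →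
      (l.foldl
        (fun (st : List String × List String) x =>
          if ((st.1 ++ [x]).length : Int) = (width : Int) then
            (List.drop 1 (st.1 ++ [x]), st.2 ++ [PySem.Str.join " _ " (st.1 ++ [x])])
          else (st.1 ++ [x], st.2)) (w, acc)).2
        = acc ++ wjoins width (w ++ l) := by
  intro l
  induction l with
  | nil =>
      intro w acc hw
      simp [wjoins_of_short width w (by omega)]
  | cons x l ih =>
      intro w acc hw
      simp only [List.foldl_cons]
      by_cases h : w.length + 1 = width
      · have hx : (((w ++ [x]).length : Int)) = (width : Int) := by
          simp [List.length_append]; omega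
        rw [if_pos hx]
        rw [ih (List.drop 1 (w ++ [x])) (acc ++ [PySem.Str.join " _ " (w ++ [x])])
              (by rw [List.length_drop]
                  simp only [List.length_append, List.length_cons, List.length_nil]
                  omega)]
        rw [List.append_assoc]
        congr 1
        cases w with
        | nil =>
            have hw1 : width = 1 := by simp at h; omega
            simp [wjoins, hw1]
        | cons y w₀ =>
            have h' : w₀.length + 2 = width := by simpa using h
            have hcond : width ≤ (w₀ ++ x :: l).length + 1 := by simp; omega
            have htake : (y :: (w₀ ++ x :: l)).take width = y :: (w₀ ++ [x]) := by
              have hsplit : y :: (w₀ ++ x :: l) = (y :: (w₀ ++ [x])) ++ l := by simp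
              rw [hsplit]
              have hl2 : width = (y :: (w₀ ++ [x])).length := by simp; omega
              rw [hl2, List.take_left]
            simp only [List.cons_append, List.nil_append, wjoins, if_pos hcond,
              List.drop_one, List.tail_cons, htake, List.append_assoc]
      · have hx : ¬ (((w ++ [x]).length : Int) = (width : Int)) := by
          simp; omega
        rw [if_neg hx]
        rw [ih (w ++ [x]) acc (by simp; omega)]
        simp

-- slicing commutes with map
theorem pl_slice_map {α β : Type} (f : α → β) (xs : List α) (a b : Int) :
    PySem.List.slice (xs.map f) (some a) (some b)
      = (PySem.List.slice xs (some a) (some b)).map f := by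
  simp [PySem.List.slice, PySem.List.clampIdx, List.map_drop, List.map_take]

-- ===== VERDICT (by name: the statement is the Claim_ definition above) =====
theorem preprocess_line_spec : Claim_equal_preprocess_line := by
  intro sentence n_context _ hpre
  unfold Spec_preprocess_line preprocess_line preprocess_line_alt
  simp only []
  obtain ⟨k, rfl⟩ : ∃ k : Nat, n_context = (k : Int) := ⟨n_context.toNat, (Int.toNat_of_nonneg hpre).symm⟩
  set toks := (PySem.Str.split? sentence " ").getD [] with htoks
  -- pads are replicates
  have hpad : ∀ s : String, (PySem.List.pyRange 0 (k : Int) 1).map (fun _ => s)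
      = List.replicate k s := by
    intro s
    rw [PySem.List.pyRange_one]
    simp [Function.comp_def, List.map_const']
  have hknat : ((k : Int)).toNat = k := by omega
  rw [hpad, hpad, hknat]
  set padded := List.replicate k "<S>" ++ toks ++ List.replicate k "<E>" with hpadded
  -- A's outer loop is a map; its inner loop is a map by plSpread
  have hinner : (fun (acc : List String) (t : String) =>
        if t = "<S>" ∨ t = "<E>" then acc ++ [t]
        else acc ++ [PySem.Str.join " " (t.toList.map (fun c => String.ofList [c]))])
      = fun acc t => acc ++ [plSpread t] := by
    funext acc t
    by_cases h : t = "<S>" ∨ t = "<E>" <;> simp [plSpread, h]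
  rw [hinner]
  have hA : (PySem.List.pyRange (k : Int) ((padded.length : Int) - (k : Int)) 1).foldl
      (fun context_tokens i =>
        context_tokens ++ [PySem.Str.join " _ "
          ((PySem.List.slice padded (some (i - k)) (some (i + k + 1))).foldl
            (fun acc t => acc ++ [plSpread t]) [])]) []
      = (PySem.List.pyRange (k : Int) ((padded.length : Int) - (k : Int)) 1).map
          (fun i => PySem.Str.join " _ "
            (PySem.List.slice (padded.map plSpread) (some (i - k)) (some (i + k + 1)))) := by
    rw [pl_foldl_push]
    simp only [List.nil_append]
    apply List.map_congr_left
    intro i _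
    rw [pl_slice_map, pl_foldl_push]
    simp
  rw [hA]
  -- B's fold over raw tokens is a fold over transformed items
  have hcast : ((2 * k + 1 : Nat) : Int) = 2 * (k : Int) + 1 := by push_cast; ring
  have hmapfold : ∀ (l : List String) (st : List String × List String),
      (l.foldl (fun (st : List String × List String) t =>
        let w := st.1 ++ [plSpread t]
        if (w.length : Int) = 2 * (k : Int) + 1 then (w.drop 1, st.2 ++ [PySem.Str.join " _ " w])
        else (w, st.2)) st)
      = ((l.map plSpread).foldl (fun (st : List String × List String) x =>
          if ((st.1 ++ [x]).length : Int) = ((2 * k + 1 : Nat) : Int) then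
            (List.drop 1 (st.1 ++ [x]), st.2 ++ [PySem.Str.join " _ " (st.1 ++ [x])])
          else (st.1 ++ [x], st.2)) st) := by
    intro l st
    rw [List.foldl_map]
    congr 1
  rw [hmapfold]
  rw [pl_slide_inv (2 * k + 1) _ (List.replicate k "<S>") [] (by simp; omega)]
  -- the stream B slides over is padded.map plSpread
  have hstream : List.replicate k "<S>" ++ (toks ++ List.replicate k "<E>").map plSpread
      = padded.map plSpread := by
    have hS : plSpread "<S>" = "<S>" := by simp [plSpread]
    have hE : plSpread "<E>" = "<E>" := by simp [plSpread]
    simp [hpadded, List.map_replicate, hS, hE]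
  rw [hstream, List.nil_append]
  -- A's range-map equals the windows
  set T := padded.map plSpread with hT
  have hTlen : T.length = padded.length := by simp [hT]
  have hplen : padded.length = k + toks.length + k := by simp [hpadded]; omega
  rw [wjoins_eq_range_map (2 * k + 1) (by omega) T]
  have hcount : T.length + 1 - (2 * k + 1) = toks.length := by omega
  rw [hcount]
  rw [PySem.List.pyRange_one]
  have hrange : (((padded.length : Int) - (k : Int)) - (k : Int)).toNat = toks.length := by
    omega
  rw [hrange, List.map_map]
  apply List.map_congr_left
  intro j hj
  simp only [Function.comp]
  congr 1
  have h1 : (k : Int) + (j : Int) - (k : Int) = ((j : Nat) : Int) := by ring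
  have h2 : (k : Int) + (j : Int) + (k : Int) + 1 = ((j : Nat) : Int) + ((2 * k + 1 : Nat) : Int) := by
    push_cast; ring
  rw [h1, h2, PySem.List.slice_natCast_add]
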